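-- pv_equiv track=rewrite | github.com/google/googletest | googlemock/scripts/generator/cpp/gmock_class.py | _EscapeForMacro
-- ===== SOURCE A (Python) =====
-- def _EscapeForMacro(s):
--   """Escapes a string for use as an argument to a C++ macro."""
--   paren_count = 0
--   for c in s:
--     if c == '(':
--       paren_count += 1
--     elif c == ')':
--       paren_count -= 1
--     elif c == ',' and paren_count == 0:
--       return '(' + s + ')'
--   return s
-- ===== SOURCE B (Python) =====
-- def _EscapeForMacro(s):
--   """Escapes a string for use as an argument to a C++ macro."""
--   if any(s[:i].count('(') == s[:i].count(')')
--          for i, c in enumerate(s) if c == ','):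
--     return '(' + s + ')'
--   return s
-- ===== Notes on version B (the rewrite author's own statement) =====
-- stated objective: alternative
-- what changed: Drops the running depth counter entirely: B declares a comma top-level iff its prefix is parenthesis-balanced, testing each comma by counting '(' and ')' in the prefix with str.count (stateless per-comma check instead of an interleaved counter loop with early return).
import Mathlib
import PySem

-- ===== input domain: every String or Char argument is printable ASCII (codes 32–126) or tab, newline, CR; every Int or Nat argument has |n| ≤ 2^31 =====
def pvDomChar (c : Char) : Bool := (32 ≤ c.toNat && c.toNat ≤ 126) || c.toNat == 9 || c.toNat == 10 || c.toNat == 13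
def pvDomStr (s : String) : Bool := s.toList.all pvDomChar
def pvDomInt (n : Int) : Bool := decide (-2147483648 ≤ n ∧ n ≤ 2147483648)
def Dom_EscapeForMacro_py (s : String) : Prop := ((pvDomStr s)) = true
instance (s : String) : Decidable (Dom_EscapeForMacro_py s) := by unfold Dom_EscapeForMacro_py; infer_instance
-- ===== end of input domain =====

-- B drops the running depth counter: it tests each comma statelessly by counting '(' and ')'
-- in the prefix before it (objective: alternative; same result, different algorithm).
-- ===== PORT A =====
-- A's loop: walk the chars with a paren counter; early-return signal = true
def pyLoopA : List Char → Int → Bool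
  | [], _ => false
  | c :: cs, n =>
    if c = '(' then pyLoopA cs (n + 1)
    else if c = ')' then pyLoopA cs (n - 1)
    else if c = ',' && n == 0 then true
    else pyLoopA cs n

def EscapeForMacro_py (s : String) : String :=
  if pyLoopA s.toList 0 then "(" ++ s ++ ")" else s

-- ===== PORT B =====
-- Source B: any(s[:i].count('(') == s[:i].count(')') for i, c in enumerate(s) if c == ',')
def EscapeForMacro_py_alt (s : String) : String :=
  if (PySem.List.enumerate s.toList).any (fun p =>
      p.2 == ',' &&
      (PySem.Chars.count (PySem.List.slice s.toList none (some p.1)) ['('] ==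
       PySem.Chars.count (PySem.List.slice s.toList none (some p.1)) [')']))
  then "(" ++ s ++ ")" else s

-- ===== PRECONDITION & SPEC =====
def Spec_EscapeForMacro_py (s : String) (out : String) : Prop := out = EscapeForMacro_py_alt s
instance (s : String) (out : String) : Decidable (Spec_EscapeForMacro_py s out) := by unfold Spec_EscapeForMacro_py; infer_instance

-- ===== CLAIM (what is proved, stated in full; the proofs are below) =====
def Claim_equal_EscapeForMacro_py : Prop := ∀ (s : String), Dom_EscapeForMacro_py s → Spec_EscapeForMacro_py s (EscapeForMacro_py s)

-- ===== LEMMAS AND PROOFS =====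

-- str.count of a single character is List.count
lemma chars_count_singleton (cs : List Char) (c : Char) :
    PySem.Chars.count cs [c] = cs.count c := by
  have go : ∀ fuel (l : List Char) acc, l.length ≤ fuel →
      PySem.Chars.count.go [c] fuel l acc = acc + l.count c := by
    intro fuel
    induction fuel with
    | zero =>
      intro l acc h
      have : l = [] := List.eq_nil_of_length_eq_zero (Nat.le_zero.mp h)
      subst this; simp [PySem.Chars.count.go]
    | succ f ih =>
      intro l acc h
      cases l with
      | nil => simp [PySem.Chars.count.go]
      | cons x t =>
        have hlen : t.length ≤ f := by simpa using h
        simp only [PySem.Chars.count.go]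
        by_cases hx : x = c
        · subst hx
          rw [if_pos (by simp [List.isPrefixOf])]
          rw [show List.drop ([x].length) (x :: t) = t from rfl]
          rw [ih t (acc + 1) hlen]
          simp
          omega
        · rw [if_neg (by simp [List.isPrefixOf]; exact fun hcx => hx hcx.symm)]
          rw [ih t acc hlen]
          simp [hx]
  simp only [PySem.Chars.count]
  rw [if_neg (by simp)]
  simpa using go cs.length cs 0 le_rfl

-- signed parenthesis balance of a prefix
def pvBal (l : List Char) : Int := (l.count '(' : Int) - (l.count ')' : Int)

-- A's loop returns true iff some comma sits where the accumulated balance cancels n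
lemma loopA_true_iff (cs : List Char) (n : Int) :
    pyLoopA cs n = true ↔
      ∃ i : Nat, ∃ _ : i < cs.length, cs[i] = ',' ∧ n + pvBal (cs.take i) = 0 := by
  induction cs generalizing n with
  | nil => simp [pyLoopA]
  | cons c cs ih =>
    have step : ∀ (m : Int),
        (∃ i : Nat, ∃ _ : i < cs.length, cs[i] = ',' ∧ m + pvBal (cs.take i) = 0) ↔
        (∃ i : Nat, ∃ _ : i + 1 < (c :: cs).length, (c :: cs)[i + 1] = ',' ∧
          (m - pvBal [c]) + pvBal ((c :: cs).take (i + 1)) = 0) := by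
      intro m
      constructor
      · rintro ⟨i, hi, hc, hb⟩
        exact ⟨i, by simpa using Nat.succ_lt_succ hi, by simpa using hc, by
          simp only [List.take_succ_cons, pvBal, List.count_cons, List.count_nil] at *
          push_cast
          push_cast at hb
          split_ifs <;> push_cast <;> omega⟩
      · rintro ⟨i, hi, hc, hb⟩
        exact ⟨i, by simpa using Nat.lt_of_succ_lt_succ hi, by simpa using hc, by
          simp only [List.take_succ_cons, pvBal, List.count_cons, List.count_nil] at *
          push_cast at hb ⊢
          split_ifs at hb <;> push_cast at hb <;> omega⟩
    by_cases h1 : c = '('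
    · subst h1
      rw [show pyLoopA ('(' :: cs) n = pyLoopA cs (n + 1) from rfl, ih]
      rw [step (n + 1)]
      constructor
      · rintro ⟨i, hi, hc, hb⟩
        refine ⟨i + 1, hi, hc, ?_⟩
        simpa [pvBal] using hb
      · rintro ⟨i, hi, hc, hb⟩
        cases i with
        | zero => simp at hc
        | succ j =>
          refine ⟨j, hi, hc, ?_⟩
          simpa [pvBal] using hb
    · by_cases h2 : c = ')'
      · subst h2
        rw [show pyLoopA (')' :: cs) n = pyLoopA cs (n - 1) from rfl, ih]
        rw [step (n - 1)]
        constructor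
        · rintro ⟨i, hi, hc, hb⟩
          refine ⟨i + 1, hi, hc, ?_⟩
          simpa [pvBal] using hb
        · rintro ⟨i, hi, hc, hb⟩
          cases i with
          | zero => simp at hc
          | succ j =>
            refine ⟨j, hi, hc, ?_⟩
            simpa [pvBal] using hb
      · by_cases h3 : c = ','
        · subst h3
          by_cases hn : n = 0
          · subst hn
            constructor
            · intro _; exact ⟨0, by simp, by simp, by simp [pvBal]⟩
            · intro _; simp [pyLoopA, h1, h2]
          · rw [show pyLoopA (',' :: cs) n = pyLoopA cs n by
                simp [pyLoopA, h1, h2, hn]]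
            rw [ih, step n]
            constructor
            · rintro ⟨i, hi, hc, hb⟩
              refine ⟨i + 1, hi, hc, ?_⟩
              simpa [pvBal] using hb
            · rintro ⟨i, hi, hc, hb⟩
              cases i with
              | zero =>
                exfalso
                simp [pvBal] at hb
                exact hn hb
              | succ j =>
                refine ⟨j, hi, hc, ?_⟩
                simpa [pvBal] using hb
        · rw [show pyLoopA (c :: cs) n = pyLoopA cs n by
              simp [pyLoopA, h1, h2, h3]]
          rw [ih, step n]
          constructor
          · rintro ⟨i, hi, hc, hb⟩
            refine ⟨i + 1, hi, hc, ?_⟩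
            simpa [pvBal, h1, h2] using hb
          · rintro ⟨i, hi, hc, hb⟩
            cases i with
            | zero => exact absurd (by simpa using hc) h3
            | succ j =>
              refine ⟨j, hi, hc, ?_⟩
              simpa [pvBal, h1, h2] using hb

-- B's scan returns true iff the same existential holds (with n = 0)
lemma anyB_true_iff (cs : List Char) :
    ((PySem.List.enumerate cs).any (fun p =>
        p.2 == ',' &&
        (PySem.Chars.count (PySem.List.slice cs none (some p.1)) ['('] ==
         PySem.Chars.count (PySem.List.slice cs none (some p.1)) [')']))) = true ↔
      ∃ i : Nat, ∃ _ : i < cs.length, cs[i] = ',' ∧ (0 : Int) + pvBal (cs.take i) = 0 := by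
  rw [List.any_eq_true]
  constructor
  · rintro ⟨p, hp, hpred⟩
    rw [PySem.List.mem_enumerate_iff] at hp
    obtain ⟨k, hk, rfl⟩ := hp
    simp only [Bool.and_eq_true, beq_iff_eq] at hpred
    obtain ⟨hc, hcount⟩ := hpred
    refine ⟨k, hk, hc, ?_⟩
    rw [show ((0 : Int) + (k : Int)) = ((k : Nat) : Int) by push_cast; ring] at hcount
    rw [PySem.List.slice_to_natCast] at hcount
    rw [chars_count_singleton, chars_count_singleton] at hcount
    simp [pvBal, hcount]
  · rintro ⟨i, hi, hc, hb⟩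
    refine ⟨((0 : Int) + i, cs[i]), ?_, ?_⟩
    · rw [PySem.List.mem_enumerate_iff]; exact ⟨i, hi, rfl⟩
    · simp only [Bool.and_eq_true, beq_iff_eq]
      refine ⟨hc, ?_⟩
      rw [show ((0 : Int) + (i : Int)) = ((i : Nat) : Int) by push_cast; ring]
      rw [PySem.List.slice_to_natCast]
      rw [chars_count_singleton, chars_count_singleton]
      simp only [pvBal] at hb
      omega

-- ===== VERDICT (by name: the statement is the Claim_ definition above) =====
theorem EscapeForMacro_py_spec : Claim_equal_EscapeForMacro_py := by
  intro s _
  unfold Spec_EscapeForMacro_py EscapeForMacro_py EscapeForMacro_py_alt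
  congr 1
  rw [Bool.eq_iff_iff, loopA_true_iff, anyB_true_iff]
  simp
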